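-- pv_equiv track=rewrite | github.com/nekodelin/Bridge_unimat | app/services/state_store.py | _merge_status
-- ===== SOURCE A (Python) =====
-- FAULT_STATUSES = {"fault"}
--
-- NORMAL_STATUSES = {"normal"}
--
-- def _merge_status(statuses: list[str]) -> str:
--     if not statuses:
--         return "inactive"
--     if any(status in FAULT_STATUSES.union({"error"}) for status in statuses):
--         return "error"
--     if all(status == "inactive" for status in statuses):
--         return "inactive"
--     if any(status == "unknown" for status in statuses):
--         return "unknown"
--     if all(status in NORMAL_STATUSES.union({"inactive"}) for status in statuses):
--         return "normal"
--     return "unknown"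
-- ===== SOURCE B (Python) =====
-- _RANK = {"inactive": 0, "normal": 1, "error": 3, "fault": 3}
-- _LEVEL = ("inactive", "normal", "unknown", "error")
--
-- def _merge_status(statuses: list[str]) -> str:
--     r = 0
--     for s in statuses:
--         r = max(r, _RANK.get(s, 2))
--     return _LEVEL[r]
-- ===== Notes on version B (the rewrite author's own statement) =====
-- stated objective: alternative
-- what changed: Replaces the chain of any/all scans over the list with a single pass that folds each status to a severity rank (inactive=0, normal=1, other/unknown=2, error/fault=3), takes the maximum rank, and maps it back to a status name.
import Mathlib
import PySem

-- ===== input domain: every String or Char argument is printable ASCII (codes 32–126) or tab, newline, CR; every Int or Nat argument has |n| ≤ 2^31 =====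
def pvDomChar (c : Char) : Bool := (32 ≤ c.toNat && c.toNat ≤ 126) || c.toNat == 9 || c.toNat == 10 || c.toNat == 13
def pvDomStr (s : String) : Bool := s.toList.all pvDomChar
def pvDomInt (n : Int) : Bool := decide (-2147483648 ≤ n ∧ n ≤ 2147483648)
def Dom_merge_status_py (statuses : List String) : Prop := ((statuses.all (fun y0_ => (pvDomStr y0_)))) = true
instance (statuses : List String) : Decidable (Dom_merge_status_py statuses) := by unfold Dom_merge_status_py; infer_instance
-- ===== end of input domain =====

-- B replaces A's chain of any/all scans by one fold to a maximum severity rank; objective: alternative single-pass decomposition.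

-- ===== PORT A =====
def merge_status_py (statuses : List String) : String :=
  if statuses.isEmpty then "inactive"
  else if statuses.any (fun s => s == "fault" || s == "error") then "error"
  else if statuses.all (fun s => s == "inactive") then "inactive"
  else if statuses.any (fun s => s == "unknown") then "unknown"
  else if statuses.all (fun s => s == "normal" || s == "inactive") then "normal"
  else "unknown"

-- ===== PORT B =====
-- _RANK.get(s, 2)
def pvRank (s : String) : Nat :=
  if s == "inactive" then 0
  else if s == "normal" then 1
  else if s == "error" then 3
  else if s == "fault" then 3
  else 2

-- single pass: r = max(r, rank(s)); then _LEVEL[r] (r ≤ 3 always, so the tuple index is total)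
def merge_status_py_alt (statuses : List String) : String :=
  let r := statuses.foldl (fun m s => max m (pvRank s)) 0
  match r with
  | 0 => "inactive"
  | 1 => "normal"
  | 2 => "unknown"
  | _ => "error"

-- ===== PRECONDITION & SPEC =====
def Spec_merge_status_py (statuses : List String) (out : String) : Prop := out = merge_status_py_alt statuses
instance (statuses : List String) (out : String) : Decidable (Spec_merge_status_py statuses out) := by unfold Spec_merge_status_py; infer_instance

-- ===== CLAIM (what is proved, stated in full; the proofs are below) =====
def Claim_equal_merge_status_py : Prop := ∀ (statuses : List String), Dom_merge_status_py statuses → Spec_merge_status_py statuses (merge_status_py statuses)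

-- ===== LEMMAS AND PROOFS =====

-- proof-only abbreviations for the three severity classes
def pvE (s : String) : Bool := s == "fault" || s == "error"
def pvN (s : String) : Bool := s == "normal"
def pvU (s : String) : Bool := !(s == "inactive") && !(s == "normal") && !(s == "error") && !(s == "fault")

lemma pvRank_eq (s : String) :
    pvRank s = if pvE s then 3 else if pvU s then 2 else if pvN s then 1 else 0 := by
  unfold pvRank pvE pvU pvN
  by_cases h1 : s == "inactive" <;> by_cases h2 : s == "normal" <;>
    by_cases h3 : s == "error" <;> by_cases h4 : s == "fault" <;>
    simp_all

lemma foldl_max_shift (l : List String) (a : Nat) :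
    l.foldl (fun m s => max m (pvRank s)) a
      = max a (l.foldl (fun m s => max m (pvRank s)) 0) := by
  induction l generalizing a with
  | nil => simp
  | cons x t ih =>
    simp only [List.foldl_cons]
    rw [ih (max a (pvRank x)), ih (max 0 (pvRank x))]
    omega

lemma foldl_max_char (l : List String) :
    l.foldl (fun m s => max m (pvRank s)) 0
      = if l.any pvE then 3 else if l.any pvU then 2 else if l.any pvN then 1 else 0 := by
  induction l with
  | nil => simp
  | cons x t ih =>
    simp only [List.foldl_cons, List.any_cons]
    rw [foldl_max_shift, ih, pvRank_eq x]
    by_cases hE : pvE x <;> by_cases hU : pvU x <;> by_cases hN : pvN x <;>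
      simp [hE, hU, hN] <;> split_ifs <;> omega

theorem merge_status_py_spec : Claim_equal_merge_status_py := by
  intro statuses _
  unfold Spec_merge_status_py merge_status_py merge_status_py_alt
  cases statuses with
  | nil => rfl
  | cons x t =>
    rw [show (x :: t).isEmpty = false from rfl]
    set l := x :: t with hl
    simp only [Bool.false_eq_true, if_false]
    rw [show (fun s => s == "fault" || s == "error") = pvE from rfl,
        foldl_max_char]
    by_cases hE : l.any pvE
    · simp [hE]
    · simp only [hE]
      by_cases hAllI : l.all (fun s => s == "inactive")
      · -- all inactive: no pvU, no pvN element
        have hU : l.any pvU = false := by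
          simp only [List.any_eq_false]
          intro s hs
          have := (List.all_eq_true.mp hAllI) s hs
          have : s = "inactive" := by simpa using this
          subst this; decide
        have hN : l.any pvN = false := by
          simp only [List.any_eq_false]
          intro s hs
          have := (List.all_eq_true.mp hAllI) s hs
          have : s = "inactive" := by simpa using this
          subst this; decide
        simp [hAllI, hU, hN]
      · simp only [hAllI, Bool.false_eq_true, if_false]
        by_cases hUnk : l.any (fun s => s == "unknown")
        · have hU : l.any pvU = true := by
            obtain ⟨s, hs, h⟩ := List.any_eq_true.mp hUnk
            have : s = "unknown" := by simpa using h
            subst this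
            exact List.any_eq_true.mpr ⟨"unknown", hs, by decide⟩
          simp [hUnk, hU]
        · simp only [hUnk, Bool.false_eq_true, if_false]
          by_cases hNI : l.all (fun s => s == "normal" || s == "inactive")
          · -- only normal/inactive, not all inactive: no pvU, some pvN
            have hU : l.any pvU = false := by
              simp only [List.any_eq_false]
              intro s hs
              have := (List.all_eq_true.mp hNI) s hs
              rcases (by simpa using this : s = "normal" ∨ s = "inactive") with h | h <;>
                (subst h; decide)
            have hN : l.any pvN = true := by
              simp only [List.all_eq_true] at hAllI
              push Not at hAllI
              obtain ⟨s, hs, h⟩ := hAllI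
              have hs' := (List.all_eq_true.mp hNI) s hs
              have : s = "normal" := by
                rcases (by simpa using hs' : s = "normal" ∨ s = "inactive") with h' | h'
                · exact h'
                · exact absurd (by simp [h']) h
              subst this
              exact List.any_eq_true.mpr ⟨"normal", hs, by decide⟩
            simp [hNI, hU, hN]
          · -- some element outside {normal, inactive}, and none is error/fault: pvU holds there
            have hU : l.any pvU = true := by
              simp only [List.all_eq_true] at hNI
              push Not at hNI
              obtain ⟨s, hs, h⟩ := hNI
              have hne : ¬(s = "normal" ∨ s = "inactive") := by
                intro hc; exact h (by rcases hc with h' | h' <;> simp [h'])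
              push Not at hne
              have hEs : pvE s = false := by
                have := List.any_eq_false.mp (by simpa using hE) s hs
                simpa using this
              refine List.any_eq_true.mpr ⟨s, hs, ?_⟩
              unfold pvU
              unfold pvE at hEs
              simp_all
            simp [hNI, hU]

-- ===== VERDICT (by name: the statement is the Claim_ definition above) =====
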